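-- pv_equiv track=rewrite | github.com/kaleabe-n/Competitve_programming | minimum time to collect all apples in a tree.py | dfs
-- ===== SOURCE A (Python) =====
-- def dfs(node,graph,parent,hasApple):
--     dist = 0
--     currHasApple = hasApple[node]
--     for n in graph[node]:
--         if n != parent:
--             ans = dfs(n,graph,node,hasApple)
--             currHasApple = currHasApple or ans>0
--             dist += ans
--     if currHasApple:
--         dist+=2
--
--     return dist
-- ===== SOURCE B (Python) =====
-- def _flags(u, graph, p, hasApple):
--     # one boolean per visited (node, parent) state, this state's flag first:
--     # flag = "this subtree contains an apple"
--     kids = [_flags(v, graph, u, hasApple) for v in graph[u] if v != p]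
--     covered = hasApple[u] or any(fs[0] for fs in kids)
--     out = [covered]
--     for fs in kids:
--         out += fs
--     return out
--
--
-- def dfs(node, graph, parent, hasApple):
--     # every apple-covering subtree costs exactly one edge walked twice
--     return 2 * _flags(node, graph, parent, hasApple).count(True)
-- ===== Notes on version B (the rewrite author's own statement) =====
-- stated objective: alternative
-- what changed: B never accumulates distances: it computes the list of boolean 'subtree contains an apple' flags of all visited nodes and returns 2 times the number of true flags, instead of A's bottom-up cost DP that folds +2 into each returned distance and re-tests it as ans>0.
import Mathlib
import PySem

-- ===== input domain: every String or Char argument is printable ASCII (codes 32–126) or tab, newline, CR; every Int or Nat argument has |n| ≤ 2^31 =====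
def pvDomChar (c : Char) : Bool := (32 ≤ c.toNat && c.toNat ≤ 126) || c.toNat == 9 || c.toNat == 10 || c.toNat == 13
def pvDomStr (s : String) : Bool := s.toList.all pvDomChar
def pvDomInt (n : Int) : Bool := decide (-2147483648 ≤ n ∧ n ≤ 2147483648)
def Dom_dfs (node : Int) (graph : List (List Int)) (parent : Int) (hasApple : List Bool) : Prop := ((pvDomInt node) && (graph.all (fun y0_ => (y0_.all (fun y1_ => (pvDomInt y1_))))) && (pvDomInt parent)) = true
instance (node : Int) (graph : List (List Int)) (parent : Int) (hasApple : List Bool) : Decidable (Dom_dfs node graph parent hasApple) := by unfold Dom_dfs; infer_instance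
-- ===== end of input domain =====

-- B replaces A's bottom-up cost accumulation by a counting formulation: it computes the list
-- of boolean 'this subtree contains an apple' flags of all visited nodes and returns
-- 2 * (number of true flags); no distances are ever accumulated or tested.
-- Both ports are fuel-bounded transliterations: on any input whose Python run returns, the
-- recursion never repeats a (node, parent) state on the call stack, so its depth is below
-- pvFuel graph.  The equivalence proof itself is a fuel induction and needs no hypotheses.

-- fuel large enough for every terminating run: (number of adjacency entries + 2)²
def pvFuel (graph : List (List Int)) : Nat :=
  (graph.foldl (fun a l => a + l.length) 0 + 2) * (graph.foldl (fun a l => a + l.length) 0 + 2)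

-- ===== PORT A =====
def dfsF : Nat → Int → List (List Int) → Int → List Bool → Int
  | 0, _, _, _, _ => 0
  | (f+1), node, graph, parent, hasApple =>
    let s := (PySem.List.pyGetD graph node []).foldl
      (fun (s : Int × Bool) n =>
        if n ≠ parent then
          let ans := dfsF f n graph node hasApple
          (s.1 + ans, s.2 || decide (ans > 0))
        else s)
      ((0 : Int), PySem.List.pyGetD hasApple node false)
    if s.2 then s.1 + 2 else s.1

def dfs (node : Int) (graph : List (List Int)) (parent : Int) (hasApple : List Bool) : Int :=
  dfsF (pvFuel graph) node graph parent hasApple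

-- ===== PORT B =====
-- _flags: the flag list of the subtree rooted at state (u, p), this state's flag first.
-- Python's fs[0] is ported as headD false: in Python every _flags result is nonempty
-- ([covered] comes first), so the default is only reached at fuel exhaustion.
def flagsF : Nat → Int → List (List Int) → Int → List Bool → List Bool
  | 0, _, _, _, _ => []
  | (f+1), u, graph, p, hasApple =>
    let kids := ((PySem.List.pyGetD graph u []).filter (fun v => v ≠ p)).map
      (fun v => flagsF f v graph u hasApple)
    let covered := PySem.List.pyGetD hasApple u false || kids.any (fun fs => fs.headD false)
    covered :: kids.flatten

def dfs_alt (node : Int) (graph : List (List Int)) (parent : Int) (hasApple : List Bool) : Int :=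
  2 * ((flagsF (pvFuel graph) node graph parent hasApple).count true : Int)

-- ===== PRECONDITION & SPEC =====
-- successors of a traversal state (u, p): the children of row u (Python-wrap lookup) other than p
def pvSucc (graph : List (List Int)) (q : Int × Int) : List (Int × Int) :=
  match PySem.List.pyGet? graph q.1 with
  | some row => (row.filter (fun v => v ≠ q.2)).map (fun v => (v, q.1))
  | none => []

-- k-step closure of a set of traversal states under pvSucc
def pvClose (graph : List (List Int)) : Nat → List (Int × Int) → List (Int × Int)
  | 0, s => s
  | (k+1), s => pvClose graph k ((s ++ s.flatMap (pvSucc graph)).eraseDups)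

-- Pre_dfs describes the inputs on which the Python A returns normally: every (node, parent)
-- state reachable along the parent-skipping walk indexes graph and hasApple validly (Python
-- negative-index wrap allowed), and no state can reach itself again (on such inputs A would
-- recurse forever).  pvFuel graph iterations suffice: there are fewer distinct states than that.
def Pre_dfs (node : Int) (graph : List (List Int)) (parent : Int) (hasApple : List Bool) : Prop :=
  ∀ q ∈ pvClose graph (pvFuel graph) [(node, parent)],
    (PySem.List.pyGet? graph q.1).isSome = true ∧
    (PySem.List.pyGet? hasApple q.1).isSome = true ∧
    q ∉ pvClose graph (pvFuel graph) (pvSucc graph q)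
instance (node : Int) (graph : List (List Int)) (parent : Int) (hasApple : List Bool) : Decidable (Pre_dfs node graph parent hasApple) := by unfold Pre_dfs; infer_instance

def pvWitness_dfs : Int × List (List Int) × Int × List Bool := (0, [[1, 2], [], [3], []], -1, [false, true, false, true])

def Spec_dfs (node : Int) (graph : List (List Int)) (parent : Int) (hasApple : List Bool) (out : Int) : Prop := out = dfs_alt node graph parent hasApple
instance (node : Int) (graph : List (List Int)) (parent : Int) (hasApple : List Bool) (out : Int) : Decidable (Spec_dfs node graph parent hasApple out) := by unfold Spec_dfs; infer_instance

-- ===== CLAIM (what is proved, stated in full; the proofs are below) =====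
def Claim_equal_dfs : Prop := ∀ (node : Int) (graph : List (List Int)) (parent : Int) (hasApple : List Bool), Dom_dfs node graph parent hasApple → Pre_dfs node graph parent hasApple → Spec_dfs node graph parent hasApple (dfs node graph parent hasApple)

-- ===== LEMMAS AND PROOFS =====

-- A's child-scanning fold, characterised over the filtered child list
lemma foldA_char (p : Int) (a : Int → Int) :
    ∀ (l : List Int) (x : Int) (b : Bool),
    l.foldl (fun (s : Int × Bool) n =>
        if n ≠ p then (s.1 + a n, s.2 || decide (a n > 0)) else s) (x, b)
      = (x + ((l.filter (fun v => v ≠ p)).map a).sum,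
         b || (l.filter (fun v => v ≠ p)).any (fun v => decide (a v > 0))) := by
  intro l
  induction l with
  | nil => intro x b; simp
  | cons c t ih =>
    intro x b
    by_cases hc : c ≠ p
    · rw [List.foldl_cons, if_pos hc]
      rw [show ((x, b).1 + a c, (x, b).2 || decide (a c > 0))
            = (x + a c, b || decide (a c > 0)) from rfl, ih]
      simp [List.filter_cons, hc, add_assoc, Bool.or_assoc]
    · rw [List.foldl_cons, if_neg hc, ih]
      simp [List.filter_cons, not_not.mp hc]

-- the invariant: A's value is twice the number of true flags in B's list, and a false
-- head flag forces the whole list (hence the count) to be zero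
lemma dfsF_eq_flagsF : ∀ (f : Nat) (u : Int) (graph : List (List Int)) (p : Int)
    (hasApple : List Bool),
    dfsF f u graph p hasApple = 2 * ((flagsF f u graph p hasApple).count true : Int)
    ∧ ((flagsF f u graph p hasApple).headD false = false →
        (flagsF f u graph p hasApple).count true = 0) := by
  intro f
  induction f with
  | zero => intro u graph p hasApple; simp [dfsF, flagsF]
  | succ f ih =>
    intro u graph p hasApple
    simp only [dfsF, flagsF]
    rw [foldA_char]
    set ch := (PySem.List.pyGetD graph u []).filter (fun v => v ≠ p) with hch
    have hcnt : ∀ v, dfsF f v graph u hasApple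
        = 2 * ((flagsF f v graph u hasApple).count true : Int) := fun v => (ih v graph u hasApple).1
    have hzero : ∀ v, (flagsF f v graph u hasApple).headD false = false →
        (flagsF f v graph u hasApple).count true = 0 := fun v => (ih v graph u hasApple).2
    have hpos : ∀ v, decide (dfsF f v graph u hasApple > 0)
        = (flagsF f v graph u hasApple).headD false := by
      intro v
      cases hh : (flagsF f v graph u hasApple).headD false with
      | false => simp [hcnt v, hzero v hh]
      | true =>
        have h1 : 1 ≤ (flagsF f v graph u hasApple).count true := by
          cases hfs : flagsF f v graph u hasApple with
          | nil => rw [hfs] at hh; simp at hh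
          | cons a t =>
            rw [hfs, List.headD_cons] at hh
            simp [hfs, hh, List.count_cons]
        simp only [hcnt v, decide_eq_true_eq]
        omega
    have hany : ch.any (fun v => decide (dfsF f v graph u hasApple > 0))
        = (ch.map (fun v => flagsF f v graph u hasApple)).any (fun fs => fs.headD false) := by
      induction ch with
      | nil => rfl
      | cons c t iht =>
        simp only [List.any_cons, List.map_cons]
        rw [hpos c, iht]
    rw [hany]
    have hsum : (ch.map (fun v => dfsF f v graph u hasApple)).sum
        = 2 * ((ch.map (fun v => (flagsF f v graph u hasApple).count true)).sum : Int) := by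
      induction ch with
      | nil => simp
      | cons c t iht =>
        simp only [List.map_cons, List.sum_cons, iht, hcnt c]
        push_cast; ring
    have hflat : ((ch.map (fun v => flagsF f v graph u hasApple)).flatten).count true
        = (ch.map (fun v => (flagsF f v graph u hasApple).count true)).sum := by
      induction ch with
      | nil => rfl
      | cons c t iht => simp [List.map_cons, List.flatten_cons, List.count_append, iht]
    constructor
    · -- the value equation
      cases hcov : (PySem.List.pyGetD hasApple u false
          || (ch.map (fun v => flagsF f v graph u hasApple)).any (fun fs => fs.headD false)) with
      | false =>
        simp only [Bool.false_eq_true, if_false, List.count_cons, hflat, hsum, zero_add]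
        push_cast; simp
      | true =>
        simp only [if_true, List.count_cons, hflat, hsum, zero_add]
        push_cast; simp; ring
    · -- false head ⇒ zero count
      intro hhead
      rw [List.headD_cons] at hhead
      rcases Bool.or_eq_false_iff.mp hhead with ⟨_, hanyf⟩
      have hall : ∀ v ∈ ch, (flagsF f v graph u hasApple).count true = 0 := by
        intro v hv
        refine hzero v ?_
        have := List.any_eq_false.mp hanyf _ (List.mem_map_of_mem hv)
        simpa using this
      have hsz : ∀ (t : List Int), (∀ v ∈ t, (flagsF f v graph u hasApple).count true = 0) →
          (t.map (fun v => (flagsF f v graph u hasApple).count true)).sum = 0 := by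
        intro t
        induction t with
        | nil => intro _; rfl
        | cons c r iht =>
          intro h
          simp [h c List.mem_cons_self, iht (fun v hv => h v (List.mem_cons_of_mem _ hv))]
      simp only [List.count_cons, hflat, hsz ch hall, hhead]
      simp

-- ===== VERDICT (by name: the statement is the Claim_ definition above) =====
theorem dfs_spec : Claim_equal_dfs := by
  intro node graph parent hasApple _ _
  unfold Spec_dfs dfs dfs_alt
  exact (dfsF_eq_flagsF (pvFuel graph) node graph parent hasApple).1
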